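-- pv_equiv track=rewrite | github.com/JVictoryLiner/Logic_Table_Generators | Basic_Truth_Table/TTB_Functions.py | call_disk
-- ===== SOURCE A (Python) =====
-- def call_disk(p, q, p_true, q_true):
--     p_disk_q = {}
--
--     if p_true and q_true:
--         for x in range(0, 4):
--             if p[x] and q[x]:
--                 p_disk_q.update({x: ["True", "True", "True"]})
--             elif p[x] and not q[x]:
--                 p_disk_q.update({x: ["True", "False", "True"]})
--             elif not p[x] and q[x]:
--                 p_disk_q.update({x: ["False", "True", "True"]})
--             elif not p[x] and not q[x]:
--                 p_disk_q.update({x: ["False", "False", "False"]})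
--     if p_true and not q_true:
--         for x in range(0, 4):
--             if p[x] and q[x]:
--                 p_disk_q.update({x: ["True", "True", "False", "True"]})
--             elif p[x] and not q[x]:
--                 p_disk_q.update({x: ["True", "False", "True", "True"]})
--             elif not p[x] and q[x]:
--                 p_disk_q.update({x: ["False", "True", "False", "True"]})
--             elif not p[x] and not q[x]:
--                 p_disk_q.update({x: ["False", "False", "True", "False"]})
--     if not p_true and q_true:
--         for x in range(0, 4):
--             if p[x] and q[x]:
--                 p_disk_q.update({x: ["True", "True", "False", "True"]})
--             elif p[x] and not q[x]:
--                 p_disk_q.update({x: ["True", "False", "False", "True"]})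
--             elif not p[x] and q[x]:
--                 p_disk_q.update({x: ["False", "True", "True", "True"]})
--             elif not p[x] and not q[x]:
--                 p_disk_q.update({x: ["False", "False", "True", "False"]})
--     if not p_true and not q_true:
--         for x in range(0, 4):
--             if not p[x] and not q[x]:
--                 p_disk_q.update({x: ["True", "True", "False", "False", "False"]})
--             elif p[x] and not q[x]:
--                 p_disk_q.update({x: ["False", "True", "True", "False", "True"]})
--             elif not p[x] and q[x]:
--                 p_disk_q.update({x: ["True", "False", "False", "True", "True"]})
--             elif p[x] and q[x]:
--                 p_disk_q.update({x: ["False", "False", "True", "True", "True"]})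
--
--     return p_disk_q
-- ===== SOURCE B (Python) =====
-- # B: evaluates the row as logical column formulas (p, q, needed negations, then the
-- # disjunction p or q) and stringifies, instead of enumerating the 16 literal case lists.
-- def call_disk(p, q, p_true, q_true):
--     result = {}
--     for x in range(4):
--         a, b = bool(p[x]), bool(q[x])
--         if p_true and q_true:
--             cols = [a, b]
--         elif not p_true and not q_true:
--             cols = [not a, not b, a, b]
--         elif p_true:
--             cols = [a, b, not b]
--         else:
--             cols = [a, b, not a]
--         result[x] = ["True" if c else "False" for c in cols + [a or b]]
--     return result
-- ===== Notes on version B (the rewrite author's own statement) =====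
-- stated objective: simpler
-- what changed: Instead of four loops enumerating 16 literal case lists, B discovers the rows are truth-table columns: it evaluates the logical formulas (p, q, the needed negations, and the disjunction p or q) per row and stringifies the booleans.
import Mathlib
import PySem

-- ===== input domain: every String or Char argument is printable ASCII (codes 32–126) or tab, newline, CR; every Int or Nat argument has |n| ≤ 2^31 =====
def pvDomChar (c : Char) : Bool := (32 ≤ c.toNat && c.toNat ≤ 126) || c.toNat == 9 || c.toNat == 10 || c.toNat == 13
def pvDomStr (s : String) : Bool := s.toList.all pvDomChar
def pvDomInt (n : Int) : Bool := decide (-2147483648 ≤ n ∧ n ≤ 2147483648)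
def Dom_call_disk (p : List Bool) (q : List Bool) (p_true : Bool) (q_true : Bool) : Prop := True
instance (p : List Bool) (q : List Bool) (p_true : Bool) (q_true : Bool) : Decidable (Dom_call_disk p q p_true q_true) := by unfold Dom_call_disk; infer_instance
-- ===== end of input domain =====

-- B evaluates each row as logical column formulas (p, q, needed negations, p∨q) and stringifies,
-- instead of A's four loops enumerating 16 literal case lists (objective: simpler).

-- ===== PORT A =====
-- p[x] / q[x]: PySem.List.pyGet?; Pre_ guarantees the index is in range, so .getD false is never taken.
def call_disk (p : List Bool) (q : List Bool) (p_true : Bool) (q_true : Bool) : List (Int × List String) :=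
  let d : PySem.Dict Int (List String) := PySem.Dict.empty
  let d := if p_true && q_true then
    (PySem.List.pyRange 0 4 1).foldl (fun d x =>
      let px := ((PySem.List.pyGet? p x).getD false)
      let qx := ((PySem.List.pyGet? q x).getD false)
      if px && qx then d.insert x ["True", "True", "True"]
      else if px && !qx then d.insert x ["True", "False", "True"]
      else if !px && qx then d.insert x ["False", "True", "True"]
      else if !px && !qx then d.insert x ["False", "False", "False"]
      else d) d
    else d
  let d := if p_true && !q_true then
    (PySem.List.pyRange 0 4 1).foldl (fun d x =>
      let px := ((PySem.List.pyGet? p x).getD false)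
      let qx := ((PySem.List.pyGet? q x).getD false)
      if px && qx then d.insert x ["True", "True", "False", "True"]
      else if px && !qx then d.insert x ["True", "False", "True", "True"]
      else if !px && qx then d.insert x ["False", "True", "False", "True"]
      else if !px && !qx then d.insert x ["False", "False", "True", "False"]
      else d) d
    else d
  let d := if !p_true && q_true then
    (PySem.List.pyRange 0 4 1).foldl (fun d x =>
      let px := ((PySem.List.pyGet? p x).getD false)
      let qx := ((PySem.List.pyGet? q x).getD false)
      if px && qx then d.insert x ["True", "True", "False", "True"]
      else if px && !qx then d.insert x ["True", "False", "False", "True"]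
      else if !px && qx then d.insert x ["False", "True", "True", "True"]
      else if !px && !qx then d.insert x ["False", "False", "True", "False"]
      else d) d
    else d
  let d := if !p_true && !q_true then
    (PySem.List.pyRange 0 4 1).foldl (fun d x =>
      let px := ((PySem.List.pyGet? p x).getD false)
      let qx := ((PySem.List.pyGet? q x).getD false)
      if !px && !qx then d.insert x ["True", "True", "False", "False", "False"]
      else if px && !qx then d.insert x ["False", "True", "True", "False", "True"]
      else if !px && qx then d.insert x ["True", "False", "False", "True", "True"]
      else if px && qx then d.insert x ["False", "False", "True", "True", "True"]
      else d) d
    else d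
  d.items

-- ===== PORT B =====
-- "True" if c else "False"
def pvStr (c : Bool) : String := if c then "True" else "False"

-- the column-formula selection of Source B
def pvCols (pt qt a b : Bool) : List Bool :=
  if pt && qt then [a, b]
  else if !pt && !qt then [!a, !b, a, b]
  else if pt then [a, b, !b]
  else [a, b, !a]

def call_disk_alt (p : List Bool) (q : List Bool) (p_true : Bool) (q_true : Bool) : List (Int × List String) :=
  ((PySem.List.pyRange 0 4 1).foldl (fun d x =>
      let a := (PySem.List.pyGet? p x).getD false
      let b := (PySem.List.pyGet? q x).getD false
      d.insert x ((pvCols p_true q_true a b ++ [a || b]).map pvStr))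
    (PySem.Dict.empty : PySem.Dict Int (List String))).items

-- ===== PRECONDITION & SPEC =====
-- Pre_ excludes exactly the inputs where the Python (both A and B) raises IndexError: a list shorter than 4.
def Pre_call_disk (p : List Bool) (q : List Bool) (p_true : Bool) (q_true : Bool) : Prop :=
  4 ≤ p.length ∧ 4 ≤ q.length
instance (p : List Bool) (q : List Bool) (p_true : Bool) (q_true : Bool) : Decidable (Pre_call_disk p q p_true q_true) := by unfold Pre_call_disk; infer_instance
def pvWitness_call_disk : List Bool × List Bool × Bool × Bool := ([true, false, true, false], [false, false, true, true], true, false)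
def Spec_call_disk (p : List Bool) (q : List Bool) (p_true : Bool) (q_true : Bool) (out : List (Int × List String)) : Prop := out = call_disk_alt p q p_true q_true
instance (p : List Bool) (q : List Bool) (p_true : Bool) (q_true : Bool) (out : List (Int × List String)) : Decidable (Spec_call_disk p q p_true q_true out) := by unfold Spec_call_disk; infer_instance

-- ===== CLAIM =====
def Claim_equal_call_disk : Prop := ∀ (p : List Bool) (q : List Bool) (p_true : Bool) (q_true : Bool), Dom_call_disk p q p_true q_true → Pre_call_disk p q p_true q_true → Spec_call_disk p q p_true q_true (call_disk p q p_true q_true)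

-- ===== LEMMAS AND PROOFS =====
-- each of A's four if/elif cascades produces exactly B's stringified column formulas
theorem pv_bodyTT (d : PySem.Dict Int (List String)) (x : Int) (px qx : Bool) :
    (if px && qx then d.insert x ["True", "True", "True"]
     else if px && !qx then d.insert x ["True", "False", "True"]
     else if !px && qx then d.insert x ["False", "True", "True"]
     else if !px && !qx then d.insert x ["False", "False", "False"]
     else d) = d.insert x ((pvCols true true px qx ++ [px || qx]).map pvStr) := by
  cases px <;> cases qx <;> rfl

theorem pv_bodyTF (d : PySem.Dict Int (List String)) (x : Int) (px qx : Bool) :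
    (if px && qx then d.insert x ["True", "True", "False", "True"]
     else if px && !qx then d.insert x ["True", "False", "True", "True"]
     else if !px && qx then d.insert x ["False", "True", "False", "True"]
     else if !px && !qx then d.insert x ["False", "False", "True", "False"]
     else d) = d.insert x ((pvCols true false px qx ++ [px || qx]).map pvStr) := by
  cases px <;> cases qx <;> rfl

theorem pv_bodyFT (d : PySem.Dict Int (List String)) (x : Int) (px qx : Bool) :
    (if px && qx then d.insert x ["True", "True", "False", "True"]
     else if px && !qx then d.insert x ["True", "False", "False", "True"]
     else if !px && qx then d.insert x ["False", "True", "True", "True"]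
     else if !px && !qx then d.insert x ["False", "False", "True", "False"]
     else d) = d.insert x ((pvCols false true px qx ++ [px || qx]).map pvStr) := by
  cases px <;> cases qx <;> rfl

theorem pv_bodyFF (d : PySem.Dict Int (List String)) (x : Int) (px qx : Bool) :
    (if !px && !qx then d.insert x ["True", "True", "False", "False", "False"]
     else if px && !qx then d.insert x ["False", "True", "True", "False", "True"]
     else if !px && qx then d.insert x ["True", "False", "False", "True", "True"]
     else if px && qx then d.insert x ["False", "False", "True", "True", "True"]
     else d) = d.insert x ((pvCols false false px qx ++ [px || qx]).map pvStr) := by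
  cases px <;> cases qx <;> rfl

-- ===== VERDICT =====
theorem call_disk_spec : Claim_equal_call_disk := by
  intro p q pt qt _ _
  unfold Spec_call_disk call_disk call_disk_alt
  cases pt <;> cases qt <;>
    simp only [Bool.true_and, Bool.false_and, Bool.not_true, Bool.not_false,
      Bool.and_true, Bool.and_false, Bool.and_self, Bool.false_eq_true,
      if_true, if_false, ite_true,
      pv_bodyTT, pv_bodyTF, pv_bodyFT, pv_bodyFF]
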